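-- pv_equiv track=rewrite | github.com/alexkahan/sportrefpy | sportrefpy/player/util/career_totals.py | unpack_career_stats
-- ===== SOURCE A (Python) =====
-- from typing import Dict
-- from typing import List
--
-- def unpack_career_stats(
--     regular_season, post_season, stats_to_include: List, totals: Dict
-- ):
--     for seasons in [regular_season, post_season]:
--         for _, season in seasons.items():
--             for stat, value in season.items():
--                 if stat in stats_to_include:
--                     if stat not in totals:
--                         totals[stat] = value
--                     elif not value:
--                         continue
--                     else:
--                         totals[stat] += value
--     return totals
-- ===== SOURCE B (Python) =====
-- def unpack_career_stats(
--     regular_season, post_season, stats_to_include, totals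
-- ):
--     include = set(stats_to_include)
--     stream = [
--         (stat, value)
--         for seasons in (regular_season, post_season)
--         for season in seasons.values()
--         for stat, value in season.items()
--         if stat in include
--     ]
--     for stat in list(totals):
--         totals[stat] += sum(v for s, v in stream if s == stat)
--     for stat, _ in stream:
--         if stat not in totals:
--             totals[stat] = sum(v for s, v in stream if s == stat)
--     return totals
-- ===== Notes on version B (the rewrite author's own statement) =====
-- stated objective: alternative
-- what changed: A threads a mutable dict through three nested loops with a three-way branch and a list-membership test per entry; B first flattens the two season dicts into one stream filtered by a set of included stats, then builds the result positionally: one pass bumps every pre-existing totals entry by that stat's sum over the stream, and a second pass appends each new stat (in first-occurrence order) with its stream sum.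
import Mathlib
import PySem

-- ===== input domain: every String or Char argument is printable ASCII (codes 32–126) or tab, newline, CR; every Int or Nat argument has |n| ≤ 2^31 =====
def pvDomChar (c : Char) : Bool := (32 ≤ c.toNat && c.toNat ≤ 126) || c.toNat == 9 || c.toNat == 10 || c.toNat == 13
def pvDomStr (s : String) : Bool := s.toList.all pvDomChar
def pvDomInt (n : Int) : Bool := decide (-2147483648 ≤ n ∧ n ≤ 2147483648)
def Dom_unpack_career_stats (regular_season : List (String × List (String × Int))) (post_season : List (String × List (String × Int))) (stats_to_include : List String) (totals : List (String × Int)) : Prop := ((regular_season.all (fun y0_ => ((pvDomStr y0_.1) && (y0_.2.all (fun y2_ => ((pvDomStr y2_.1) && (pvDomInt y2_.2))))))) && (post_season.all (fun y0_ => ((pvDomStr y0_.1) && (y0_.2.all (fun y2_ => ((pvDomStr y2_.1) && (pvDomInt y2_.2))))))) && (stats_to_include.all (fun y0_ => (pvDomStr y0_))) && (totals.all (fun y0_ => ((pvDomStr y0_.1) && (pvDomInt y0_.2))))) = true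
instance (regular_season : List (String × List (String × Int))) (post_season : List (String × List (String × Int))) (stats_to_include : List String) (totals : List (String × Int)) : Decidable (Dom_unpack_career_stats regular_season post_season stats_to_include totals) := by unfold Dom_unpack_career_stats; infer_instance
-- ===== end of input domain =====

-- B replaces A's mutable-dict three-way accumulation by a flatten-then-build pass: the filtered (stat,value) stream is
-- materialised once, existing totals entries are bumped by per-stat stream sums, and new stats are appended in
-- first-occurrence order (equivalence is about the RETURN value; Python A and B both mutate `totals`).

-- ===== PORT A =====
-- loop body of A's innermost `for stat, value in season.items()` loop
def ucsAStep (stats_to_include : List String) (acc : PySem.Dict String Int) (p : String × Int) : PySem.Dict String Int :=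
  if stats_to_include.contains p.1 then
    if acc.contains p.1 = false then acc.insert p.1 p.2
    else if p.2 = 0 then acc
    else acc.insert p.1 (acc.getD p.1 0 + p.2)
  else acc

def unpack_career_stats (regular_season : List (String × List (String × Int))) (post_season : List (String × List (String × Int))) (stats_to_include : List String) (totals : List (String × Int)) : List (String × Int) :=
  (([regular_season, post_season]).foldl
    (fun acc seasons => seasons.foldl
      (fun acc kv => kv.2.foldl (ucsAStep stats_to_include) acc) acc)
    (PySem.Dict.mk totals)).items

-- ===== PORT B =====
-- B's `sum(v for s, v in stream if s == stat)`
def ucsSumFor (stream : List (String × Int)) (k : String) : Int :=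
  ((stream.filter (fun p => p.1 == k)).map Prod.snd).sum

def unpack_career_stats_alt (regular_season : List (String × List (String × Int))) (post_season : List (String × List (String × Int))) (stats_to_include : List String) (totals : List (String × Int)) : List (String × Int) :=
  let includeSet := PySem.Set.ofList stats_to_include
  let stream := [regular_season, post_season].flatMap
    (fun seasons => seasons.flatMap (fun kv => kv.2.filter (fun p => includeSet.contains p.1)))
  -- first loop: bump every pre-existing totals entry by its stream sum
  let updated := totals.map (fun p => (p.1, p.2 + ucsSumFor stream p.1))
  -- second loop: append each stat not yet present, in first-occurrence order
  stream.foldl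
    (fun acc p =>
      if acc.any (fun q => q.1 == p.1) then acc
      else acc ++ [(p.1, ucsSumFor stream p.1)])
    updated

-- ===== PRECONDITION & SPEC =====
-- Pre_ excludes totals association lists with a duplicated key: those represent no Python dict at all
-- (a Python dict has unique keys), so nothing is claimed about them.
def Pre_unpack_career_stats (regular_season : List (String × List (String × Int))) (post_season : List (String × List (String × Int))) (stats_to_include : List String) (totals : List (String × Int)) : Prop :=
  (totals.map Prod.fst).Nodup
instance (regular_season : List (String × List (String × Int))) (post_season : List (String × List (String × Int))) (stats_to_include : List String) (totals : List (String × Int)) : Decidable (Pre_unpack_career_stats regular_season post_season stats_to_include totals) := by unfold Pre_unpack_career_stats; infer_instance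
def pvWitness_unpack_career_stats : (List (String × List (String × Int))) × (List (String × List (String × Int))) × List String × (List (String × Int)) :=
  ([("2020", [("pts", 10), ("ast", 3)])], [("2020", [("pts", 4)])], ["pts"], [("pts", 5)])

def Spec_unpack_career_stats (regular_season : List (String × List (String × Int))) (post_season : List (String × List (String × Int))) (stats_to_include : List String) (totals : List (String × Int)) (out : List (String × Int)) : Prop := out = unpack_career_stats_alt regular_season post_season stats_to_include totals
instance (regular_season : List (String × List (String × Int))) (post_season : List (String × List (String × Int))) (stats_to_include : List String) (totals : List (String × Int)) (out : List (String × Int)) : Decidable (Spec_unpack_career_stats regular_season post_season stats_to_include totals out) := by unfold Spec_unpack_career_stats; infer_instance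

-- ===== CLAIM (what is proved, stated in full; the proofs are below) =====
def Claim_equal_unpack_career_stats : Prop := ∀ (regular_season : List (String × List (String × Int))) (post_season : List (String × List (String × Int))) (stats_to_include : List String) (totals : List (String × Int)), Dom_unpack_career_stats regular_season post_season stats_to_include totals → Pre_unpack_career_stats regular_season post_season stats_to_include totals → Spec_unpack_career_stats regular_season post_season stats_to_include totals (unpack_career_stats regular_season post_season stats_to_include totals)

-- ===== LEMMAS AND PROOFS =====

-- uniform per-entry dict update d[k] = d.get(k, 0) + v (proof-side normal form of A's branchy step)
def ucsAddStep (d : PySem.Dict String Int) (p : String × Int) : PySem.Dict String Int :=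
  d.insert p.1 (d.getD p.1 0 + p.2)

-- A's loop body with the membership test stripped (it runs on the already-filtered stream)
def ucsACore (acc : PySem.Dict String Int) (p : String × Int) : PySem.Dict String Int :=
  if acc.contains p.1 = false then acc.insert p.1 p.2
  else if p.2 = 0 then acc
  else acc.insert p.1 (acc.getD p.1 0 + p.2)

-- the new-key tail: stats in L not among keys ks, in first-occurrence order, valued by their remaining sum
def ucsNew (ks : List String) : List (String × Int) → List (String × Int)
  | [] => []
  | p :: L => if p.1 ∈ ks then ucsNew ks L
              else (p.1, p.2 + ucsSumFor L p.1) :: ucsNew (p.1 :: ks) L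

theorem ucsSumFor_cons (p : String × Int) (L : List (String × Int)) (k : String) :
    ucsSumFor (p :: L) k = (if p.1 = k then p.2 else 0) + ucsSumFor L k := by
  by_cases h : p.1 = k <;> simp [ucsSumFor, h]

theorem ucsSumFor_nil (k : String) : ucsSumFor [] k = 0 := rfl

theorem ucsNew_congr (L : List (String × Int)) :
    ∀ (ks ks' : List String), (∀ k, k ∈ ks ↔ k ∈ ks') → ucsNew ks L = ucsNew ks' L := by
  induction L with
  | nil => intro ks ks' _; rfl
  | cons p L ih =>
      intro ks ks' h
      by_cases hp : p.1 ∈ ks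
      · rw [ucsNew, ucsNew, if_pos hp, if_pos ((h p.1).mp hp)]
        exact ih ks ks' h
      · rw [ucsNew, ucsNew, if_neg hp, if_neg (fun hh => hp ((h p.1).mpr hh))]
        congr 1
        apply ih
        intro k; simp [h k]

theorem ucs_foldl_flatMap {α β : Type} (f : α → String × Int → α) (g : β → List (String × Int)) :
    ∀ (l : List β) (a : α), l.foldl (fun a b => (g b).foldl f a) a = (l.flatMap g).foldl f a := by
  intro l
  induction l with
  | nil => intro a; rfl
  | cons b l ih => intro a; simp [List.foldl_append, ih]

theorem ucs_foldl_filter (inc : List String) :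
    ∀ (L : List (String × Int)) (d : PySem.Dict String Int),
      L.foldl (ucsAStep inc) d = (L.filter (fun p => inc.contains p.1)).foldl ucsACore d := by
  intro L
  induction L with
  | nil => intro d; rfl
  | cons p L ih =>
      intro d
      cases h : inc.contains p.1 with
      | true =>
          have e : ucsAStep inc d p = ucsACore d p := by simp only [ucsAStep, ucsACore, h, if_true]
          simp only [List.foldl_cons, List.filter_cons, h, if_true, e, ih]
      | false =>
          have e : ucsAStep inc d p = d := by simp only [ucsAStep, h, Bool.false_eq_true, if_false]
          simp only [List.foldl_cons, List.filter_cons, h, e, ih]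
          simp

theorem ucs_insert_getD_self (d : PySem.Dict String Int) (s : String)
    (hnd : d.keys.Nodup) (hc : d.contains s = true) :
    d.insert s (d.getD s 0) = d := by
  apply PySem.Dict.ext
  rw [PySem.Dict.items_insert_of_contains _ _ hc]
  conv_rhs => rw [← List.map_id d.items]
  apply List.map_congr_left
  intro p hp
  by_cases h1 : p.1 = s
  · have : d.getD s 0 = p.2 := by
      have : (p.1, p.2) ∈ d.items := by simpa using hp
      rw [← h1]
      exact PySem.Dict.getD_of_mem_items d this hnd 0
    simp [Prod.ext_iff, h1, this]
  · simp [h1]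

theorem ucsACore_eq_add (d : PySem.Dict String Int) (p : String × Int)
    (hnd : d.keys.Nodup) : ucsACore d p = ucsAddStep d p := by
  rw [ucsACore, ucsAddStep]
  cases hc : d.contains p.1 with
  | false =>
      rw [if_pos rfl, PySem.Dict.getD_of_not_contains _ _ hc, zero_add]
  | true =>
      rw [if_neg (by simp)]
      by_cases hv : p.2 = 0
      · rw [if_pos hv, hv, add_zero, ucs_insert_getD_self d p.1 hnd hc]
      · rw [if_neg hv]

theorem ucs_nodup_add (d : PySem.Dict String Int) (p : String × Int)
    (hnd : d.keys.Nodup) : (ucsAddStep d p).keys.Nodup :=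
  PySem.Dict.nodup_keys_insert d p.1 _ hnd

theorem ucs_foldl_core_eq_add (L : List (String × Int)) :
    ∀ (d : PySem.Dict String Int), d.keys.Nodup →
      L.foldl ucsACore d = L.foldl ucsAddStep d := by
  induction L with
  | nil => intro d _; rfl
  | cons p L ih =>
      intro d hnd
      simp only [List.foldl_cons]
      rw [ucsACore_eq_add d p hnd]
      exact ih _ (ucs_nodup_add d p hnd)

-- the dict fold, characterised as B builds it: bumped old items, then the new-key tail
theorem ucs_foldl_add_items (L : List (String × Int)) :
    ∀ (d : PySem.Dict String Int), d.keys.Nodup →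
      (L.foldl ucsAddStep d).items
        = d.items.map (fun q => (q.1, q.2 + ucsSumFor L q.1)) ++ ucsNew d.keys L := by
  induction L with
  | nil =>
      intro d _
      simp [ucsNew, ucsSumFor_nil]
  | cons p L ih =>
      intro d hnd
      simp only [List.foldl_cons]
      rw [ih _ (ucs_nodup_add d p hnd)]
      cases hc : d.contains p.1 with
      | true =>
          have hkeys : (ucsAddStep d p).keys = d.keys := by
            rw [ucsAddStep]; exact PySem.Dict.keys_insert_of_contains _ _ hc
          have hmem : p.1 ∈ d.keys := (PySem.Dict.contains_iff_mem_keys d p.1).mp hc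
          have hitems : (ucsAddStep d p).items
              = d.items.map (fun q => if q.1 == p.1 then (p.1, d.getD p.1 0 + p.2) else q) := by
            rw [ucsAddStep]; exact PySem.Dict.items_insert_of_contains _ _ hc
          rw [hkeys, hitems, List.map_map, ucsNew, if_pos hmem]
          congr 1
          apply List.map_congr_left
          intro q hq
          simp only [Function.comp]
          by_cases h1 : q.1 = p.1
          · have hqd : d.getD p.1 0 = q.2 := by
              have : (q.1, q.2) ∈ d.items := by simpa using hq
              rw [← h1]; exact PySem.Dict.getD_of_mem_items d this hnd 0
            simp only [h1, beq_self_eq_true, if_true]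
            rw [ucsSumFor_cons, if_pos rfl, hqd]
            simp [add_assoc]
          · have hne : (q.1 == p.1) = false := by simp [h1]
            rw [hne]
            simp only [Bool.false_eq_true, if_false]
            rw [ucsSumFor_cons, if_neg (fun e => h1 e.symm), zero_add]
      | false =>
          have hnmem : p.1 ∉ d.keys := by
            intro h; rw [(PySem.Dict.contains_iff_mem_keys d p.1).mpr h] at hc; cases hc
          have hkeys : (ucsAddStep d p).keys = d.keys ++ [p.1] := by
            rw [ucsAddStep]; exact PySem.Dict.keys_insert_of_not_contains _ _ hc
          have hitems : (ucsAddStep d p).items = d.items ++ [(p.1, p.2)] := by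
            rw [ucsAddStep, PySem.Dict.items_insert_of_not_contains _ _ hc,
                PySem.Dict.getD_of_not_contains _ _ hc, zero_add]
          rw [hkeys, hitems, List.map_append, ucsNew, if_neg hnmem]
          rw [ucsNew_congr L (d.keys ++ [p.1]) (p.1 :: d.keys) (by intro k; simp [or_comm])]
          simp only [List.map_cons, List.map_nil, List.append_assoc, List.singleton_append]
          congr 1
          apply List.map_congr_left
          intro q hq
          have h1 : q.1 ≠ p.1 := by
            intro e
            exact hnmem (e ▸ List.mem_map_of_mem hq)
          rw [ucsSumFor_cons, if_neg (fun e => h1 e.symm), zero_add]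

-- B's second loop, characterised against the same new-key tail
theorem ucs_bfold (full : List (String × Int)) (L : List (String × Int)) :
    ∀ (acc : List (String × Int)),
      (∀ k, (acc.any (fun q => q.1 == k)) = false → ucsSumFor full k = ucsSumFor L k) →
      L.foldl
        (fun acc p =>
          if acc.any (fun q => q.1 == p.1) then acc
          else acc ++ [(p.1, ucsSumFor full p.1)]) acc
        = acc ++ ucsNew (acc.map Prod.fst) L := by
  induction L with
  | nil => intro acc _; simp [ucsNew]
  | cons p L ih =>
      intro acc H
      simp only [List.foldl_cons]
      cases ha : acc.any (fun q => q.1 == p.1) with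
      | true =>
          have hmem : p.1 ∈ acc.map Prod.fst := by
            rcases List.any_eq_true.mp ha with ⟨q, hq, he⟩
            exact List.mem_map.mpr ⟨q, hq, (beq_iff_eq.mp he)⟩
          rw [if_pos rfl, ucsNew, if_pos hmem]
          apply ih
          intro k hk
          have hne : p.1 ≠ k := by
            intro e
            rw [e] at ha; rw [ha] at hk; cases hk
          have := H k hk
          rw [this, ucsSumFor_cons, if_neg hne, zero_add]
      | false =>
          have hnmem : p.1 ∉ acc.map Prod.fst := by
            intro h
            rcases List.mem_map.mp h with ⟨q, hq, he⟩
            have : acc.any (fun q => q.1 == p.1) = true :=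
              List.any_eq_true.mpr ⟨q, hq, beq_iff_eq.mpr he⟩
            rw [this] at ha; cases ha
          rw [if_neg (by simp), ucsNew, if_neg hnmem]
          have hval : ucsSumFor full p.1 = p.2 + ucsSumFor L p.1 := by
            rw [H p.1 ha, ucsSumFor_cons, if_pos rfl]
          rw [ih (acc ++ [(p.1, ucsSumFor full p.1)]) ?_]
          · rw [List.map_append, hval]
            simp only [List.map_cons, List.map_nil, List.append_assoc, List.singleton_append]
            congr 2
            exact ucsNew_congr L (acc.map Prod.fst ++ [p.1]) (p.1 :: acc.map Prod.fst)
              (by intro k; simp [or_comm])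
          · intro k hk
            simp only [List.any_append, Bool.or_eq_false_iff] at hk
            have hne : p.1 ≠ k := by
              have := hk.2
              simp only [List.any_cons, List.any_nil, Bool.or_false] at this
              exact fun e => by simp [e] at this
            rw [H k hk.1, ucsSumFor_cons, if_neg hne, zero_add]

-- ===== VERDICT (by name: the statement is the Claim_ definition above) =====
theorem unpack_career_stats_spec : Claim_equal_unpack_career_stats := by
  unfold Claim_equal_unpack_career_stats
  intro rs ps inc totals _ hpre
  unfold Spec_unpack_career_stats Pre_unpack_career_stats at *
  have hco : ∀ x : String, (PySem.Set.ofList inc).contains x = inc.contains x := by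
    intro x; by_cases hx : x ∈ inc <;> simp [hx, PySem.Set.mem_ofList]
  have inner : ∀ (seasons : List (String × List (String × Int)))
      (acc : PySem.Dict String Int),
      seasons.foldl (fun acc kv => kv.2.foldl (ucsAStep inc) acc) acc
        = (seasons.flatMap (fun kv => kv.2)).foldl (ucsAStep inc) acc :=
    fun seasons acc => ucs_foldl_flatMap (ucsAStep inc) (fun kv => kv.2) seasons acc
  rw [unpack_career_stats]
  simp only [inner]
  rw [ucs_foldl_flatMap (ucsAStep inc) (fun seasons => seasons.flatMap (fun kv => kv.2))
        [rs, ps] (PySem.Dict.mk totals)]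
  rw [ucs_foldl_filter inc]
  rw [unpack_career_stats_alt]
  simp only [hco]
  simp only [← List.filter_flatMap]
  have ht : (PySem.Dict.mk totals).keys.Nodup := hpre
  set stream := ([rs, ps].flatMap (fun seasons => seasons.flatMap (fun kv => kv.2))).filter
      (fun p => inc.contains p.1) with hstream
  rw [ucs_foldl_core_eq_add stream (PySem.Dict.mk totals) ht,
      ucs_foldl_add_items stream (PySem.Dict.mk totals) ht,
      ucs_bfold stream stream (totals.map (fun p => (p.1, p.2 + ucsSumFor stream p.1)))
        (fun k _ => rfl)]
  have hi : (PySem.Dict.mk totals).items = totals := rfl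
  have hk : (PySem.Dict.mk totals).keys = totals.map Prod.fst := rfl
  rw [hi, hk, List.map_map]
  congr 1
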